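-- pv_equiv track=rewrite | github.com/kapil94/python_programs | Similarstring.py | similarString
-- ===== SOURCE A (Python) =====
-- def similarString(teststr1,teststr2,K):
-- 	count1=0
-- 	count2=0
-- 	mydict1={}
-- 	mydict2={}
--
-- 	for i in range(0,len(teststr1)):
-- 		count1=teststr1.count(teststr1[i])
-- 		mydict1[teststr1[i]]=count1
--
-- 	for i in range(0,len(teststr2)):
-- 		count2=teststr2.count(teststr2[i])
-- 		mydict2[teststr2[i]]=count2
--
-- 	max_val1=[]
-- 	max_val2=[]
-- 	for key in mydict1:
-- 		max_val1.append(mydict1[key])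
--
-- 	for key in mydict2:
-- 		max_val2.append(mydict2[key])
--
-- 	if K>=abs(max(max_val1)-max(max_val2)):
-- 		return True
-- 	else:
-- 		return False
-- ===== SOURCE B (Python) =====
-- def similarString(teststr1, teststr2, K):
--     def maxfreq(s):
--         # sort the characters; equal characters become adjacent, so the
--         # lengths of consecutive equal-character runs are the frequencies
--         runs = []
--         run = 0
--         prev = None
--         for c in sorted(s):
--             if (prev is not None) and c == prev:
--                 run += 1
--             else:
--                 if run:
--                     runs.append(run)
--                 run = 1
--                 prev = c
--         if run:
--             runs.append(run)
--         return max(runs)   # raises ValueError on the empty string, like A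
--     return K >= abs(maxfreq(teststr1) - maxfreq(teststr2))
-- ===== Notes on version B (the rewrite author's own statement) =====
-- stated objective: faster
-- what changed: Replaces A's per-index s.count rescans plus dict/value-collection passes with a sort-and-scan: sort each string's characters and take the maximum length of consecutive equal-character runs; Pre_ excludes empty strings, on which A's max([]) raises ValueError (B raises too).
import Mathlib
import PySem

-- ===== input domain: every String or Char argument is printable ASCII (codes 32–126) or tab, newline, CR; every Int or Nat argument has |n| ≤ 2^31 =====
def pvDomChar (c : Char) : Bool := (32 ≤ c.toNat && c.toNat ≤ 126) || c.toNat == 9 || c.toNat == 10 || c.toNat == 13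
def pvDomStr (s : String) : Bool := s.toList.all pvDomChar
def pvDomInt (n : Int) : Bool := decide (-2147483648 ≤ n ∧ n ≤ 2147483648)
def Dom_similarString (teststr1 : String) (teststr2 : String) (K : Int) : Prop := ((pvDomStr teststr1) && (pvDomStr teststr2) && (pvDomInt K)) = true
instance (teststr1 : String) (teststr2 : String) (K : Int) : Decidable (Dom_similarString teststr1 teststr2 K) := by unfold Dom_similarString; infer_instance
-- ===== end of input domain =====

-- B replaces A's per-index s.count rescans and dict/value-collection passes with a sort-and-scan
-- (max length of a consecutive equal-character run in the sorted string); objective: faster.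

-- ===== PORT A =====
-- A's dict-building loop 'for i in range(0,len(s)): mydict[s[i]] = s.count(s[i])'.
-- str.count of the 1-character string s[i] equals the character count, so List.count is exact here.
def pvADict (cs : List Char) : PySem.Dict Char Int :=
  (PySem.List.pyRange 0 (PySem.List.len cs) 1).foldl
    (fun d i =>
      let c := PySem.List.pyGetD cs i ' '
      d.insert c ((cs.count c : Int)))
    PySem.Dict.empty

-- 'max_val = []; for key in mydict: max_val.append(mydict[key])'
def pvAVals (d : PySem.Dict Char Int) : List Int :=
  d.keys.foldl (fun acc k => acc ++ [d.getD k 0]) []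

def similarString (teststr1 : String) (teststr2 : String) (K : Int) : Bool :=
  -- 'if K >= abs(max(max_val1) - max(max_val2)): return True else: return False'; max([]) raises (Pre_)
  match PySem.List.max? (pvAVals (pvADict teststr1.toList)) (fun x => x),
        PySem.List.max? (pvAVals (pvADict teststr2.toList)) (fun x => x) with
  | some m1, some m2 => decide (|m1 - m2| ≤ K)
  | _, _ => false

-- ===== PORT B =====
-- the loop body 'if prev is not None and c == prev: run += 1 else: (if run: runs.append(run)); run = 1; prev = c'
def pvStep (st : List Int × Int × Option Char) (c : Char) : List Int × Int × Option Char :=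
  match st with
  | (runs, run, prev) =>
    if prev = some c then (runs, run + 1, prev)
    else ((if run ≠ 0 then runs ++ [run] else runs), 1, some c)

-- 'for c in sorted(s): …' then the trailing 'if run: runs.append(run)' and 'max(runs)'
-- (max of an empty run list = Python's ValueError = none, excluded by Pre_)
def pvBFlush (st : List Int × Int × Option Char) : List Int :=
  if st.2.1 ≠ 0 then st.1 ++ [st.2.1] else st.1

def pvBMaxfreq? (cs : List Char) : Option Int :=
  PySem.List.max? (pvBFlush ((PySem.List.sorted cs (fun c => c) false).foldl pvStep ([], 0, none)))
    (fun x => x)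

def similarString_alt (teststr1 : String) (teststr2 : String) (K : Int) : Bool :=
  match pvBMaxfreq? teststr1.toList with
  | none => false
  | some m1 =>
    match pvBMaxfreq? teststr2.toList with
    | none => false
    | some m2 => decide (|m1 - m2| ≤ K)

-- ===== PRECONDITION & SPEC =====
-- A raises ValueError (max() of an empty sequence) when either string is empty; excluded.
def Pre_similarString (teststr1 : String) (teststr2 : String) (K : Int) : Prop :=
  PySem.Str.len teststr1 ≠ 0 ∧ PySem.Str.len teststr2 ≠ 0
instance (teststr1 : String) (teststr2 : String) (K : Int) : Decidable (Pre_similarString teststr1 teststr2 K) := by unfold Pre_similarString; infer_instance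
def pvWitness_similarString : String × String × Int := ("abca", "zz", 2)

def Spec_similarString (teststr1 : String) (teststr2 : String) (K : Int) (out : Bool) : Prop := out = similarString_alt teststr1 teststr2 K
instance (teststr1 : String) (teststr2 : String) (K : Int) (out : Bool) : Decidable (Spec_similarString teststr1 teststr2 K out) := by unfold Spec_similarString; infer_instance

-- ===== CLAIM (what is proved, stated in full; the proofs are below) =====
def Claim_equal_similarString : Prop := ∀ (teststr1 : String) (teststr2 : String) (K : Int), Dom_similarString teststr1 teststr2 K → Pre_similarString teststr1 teststr2 K → Spec_similarString teststr1 teststr2 K (similarString teststr1 teststr2 K)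

-- ===== LEMMAS AND PROOFS =====

-- recursive description of B's run-length scan, starting a run of length n on character c
def pvRunsOf (c : Char) (n : Int) : List Char → List Int
  | [] => [n]
  | x :: t => if x = c then pvRunsOf c (n + 1) t else n :: pvRunsOf x 1 t

-- B's fold (plus the trailing flush) computes pvRunsOf
theorem pvFold_runs (l : List Char) (runs : List Int) (n : Int) (c : Char) (hn : 0 < n) :
    pvBFlush (l.foldl pvStep (runs, n, some c)) = runs ++ pvRunsOf c n l := by
  induction l generalizing runs n c with
  | nil =>
    have hn' : n ≠ 0 := by omega
    simp [pvBFlush, pvRunsOf, hn']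
  | cons x t ih =>
    by_cases hx : x = c
    · subst hx
      simpa [pvRunsOf, pvStep] using ih runs (n + 1) x (by omega)
    · have hn' : n ≠ 0 := by omega
      have hcx : ¬ ((some c : Option Char) = some x) := by
        intro h; exact hx (Option.some.inj h).symm
      simp only [List.foldl_cons, pvStep, if_neg hcx, ne_eq, hn', not_false_eq_true, if_true]
      rw [ih (runs ++ [n]) 1 x (by omega)]
      simp [pvRunsOf, hx]

-- the run lengths of a sorted tail are, up to order, the character counts
theorem pvRunsOf_perm (l : List Char) (c : Char) (n : Int) (hn : 0 < n)
    (hs : (c :: l).Pairwise (· ≤ ·)) :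
    (pvRunsOf c n l).Perm
      (((c :: l).dedup).map (fun k => (if k = c then n - 1 else 0) + ((c :: l).count k : Int))) := by
  induction l generalizing c n with
  | nil =>
    simp [pvRunsOf, List.count_cons]
  | cons x t ih =>
    by_cases hx : x = c
    · subst hx
      have hs' : (x :: t).Pairwise (· ≤ ·) := hs.tail
      have hd : (x :: x :: t).dedup = (x :: t).dedup :=
        List.dedup_cons_of_mem (List.mem_cons_self)
      have h1 := ih x (n + 1) (by omega) hs'
      rw [pvRunsOf, if_pos rfl, hd]
      refine h1.trans (List.Perm.of_eq (List.map_congr_left ?_))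
      intro k hk
      by_cases hkx : k = x
      · subst hkx
        simp
      · have hxk : ¬ x = k := fun h => hkx h.symm
        simp [hkx, hxk]
    · -- x ≠ c: c is strictly below everything in x :: t, so it does not occur there
      obtain ⟨hall, htail⟩ := List.pairwise_cons.mp hs
      have hcx : c < x := lt_of_le_of_ne (hall x List.mem_cons_self) (fun h => hx h.symm)
      have hclt : ∀ u ∈ x :: t, c < u := by
        intro u hu
        rcases List.mem_cons.mp hu with h | h
        · subst h; exact hcx
        · exact lt_of_lt_of_le hcx ((List.pairwise_cons.mp htail).1 u h)
      have hcnot : c ∉ x :: t := fun h => lt_irrefl c (hclt c h)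
      have hd : (c :: x :: t).dedup = c :: (x :: t).dedup :=
        List.dedup_cons_of_notMem hcnot
      have hhead : (if c = c then n - 1 else 0) + (((c :: x :: t).count c : Nat) : Int) = n := by
        have h0 : (x :: t).count c = 0 := List.count_eq_zero.mpr hcnot
        simp [h0]
      rw [pvRunsOf, if_neg hx, hd, List.map_cons, hhead]
      have h1 := ih x 1 (by omega) htail
      refine List.Perm.cons n (h1.trans (List.Perm.of_eq (List.map_congr_left ?_)))
      intro k hk
      have hkmem : k ∈ x :: t := List.mem_dedup.mp hk
      have hkc : k ≠ c := fun h => lt_irrefl c (h ▸ hclt k hkmem)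
      have hck : ¬ c = k := fun h => hkc h.symm
      have hcount : (c :: x :: t).count k = (x :: t).count k := by
        simp [List.count_cons, hck]
      rw [hcount]
      have hkc' : (k = c) = False := by simp [hkc]
      by_cases hkx : k = x <;> simp [hkx, hkc', hx]

-- max over Int with identity key is permutation-invariant
theorem pvMax?_id_perm (l1 l2 : List Int) (h : l1.Perm l2) :
    PySem.List.max? l1 (fun x => x) = PySem.List.max? l2 (fun x => x) := by
  cases h1 : PySem.List.max? l1 (fun x => x) with
  | none =>
    have : l1 = [] := (PySem.List.max?_eq_none_iff l1 _).mp h1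
    subst this
    have : l2 = [] := h.nil_eq.symm
    subst this
    exact ((PySem.List.max?_eq_none_iff [] (fun x : Int => x)).mpr rfl).symm
  | some m1 =>
    cases h2 : PySem.List.max? l2 (fun x => x) with
    | none =>
      have : l2 = [] := (PySem.List.max?_eq_none_iff l2 _).mp h2
      subst this
      have : l1 = [] := h.eq_nil
      subst this
      simp [PySem.List.max?] at h1
    | some m2 =>
      have hm1 : m1 ∈ l2 := h.mem_iff.mp (PySem.List.max?_mem h1)
      have hm2 : m2 ∈ l1 := h.mem_iff.mpr (PySem.List.max?_mem h2)
      have h12 : m1 ≤ m2 := PySem.List.max?_isMax h2 m1 hm1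
      have h21 : m2 ≤ m1 := PySem.List.max?_isMax h1 m2 hm2
      have : m1 = m2 := le_antisymm h12 h21
      rw [this]

-- A's collected dict values are exactly the counts over the distinct characters
theorem pvAVals_eq (cs : List Char) :
    pvAVals (pvADict cs) = (PySem.Set.ofList cs).map (fun k => ((cs.count k : Nat) : Int)) := by
  have hA : pvADict cs = cs.foldl (fun d c => d.insert c ((cs.count c : Int))) PySem.Dict.empty := by
    unfold pvADict
    exact PySem.List.foldl_pyRange_zero_pyGetD cs ' '
      (fun d c => d.insert c ((cs.count c : Int))) PySem.Dict.empty
  have hkeys : (pvADict cs).keys = PySem.Set.ofList cs := by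
    rw [hA, PySem.Dict.keys_foldl_insert]
    simp only [PySem.Dict.keys_empty]
    exact PySem.Set.update_nil_left cs
  have hgetD : ∀ (l : List Char) (d : PySem.Dict Char Int) (k : Char),
      (l.foldl (fun d c => d.insert c ((cs.count c : Int))) d).getD k 0
        = if k ∈ l then (cs.count k : Int) else d.getD k 0 := by
    intro l
    induction l with
    | nil => simp
    | cons c t iht =>
      intro d k
      simp only [List.foldl_cons, iht, PySem.Dict.getD_insert, List.mem_cons]
      by_cases hk : k ∈ t
      · simp [hk]
      · by_cases hc : k = c <;> simp [hk, hc]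
  have hvals : pvAVals (pvADict cs) = (pvADict cs).keys.map (fun k => (pvADict cs).getD k 0) := by
    unfold pvAVals
    rw [PySem.List.foldl_append_singleton_eq_map]
    simp
  rw [hvals, hkeys]
  apply List.map_congr_left
  intro k hk
  have hmem : k ∈ cs := (PySem.Set.mem_ofList cs k).mp hk
  rw [hA, hgetD]
  simp [hmem]

-- per-string agreement: A's max over dict values = B's max run length, for a nonempty string
theorem pvMaxfreq_agree (cs : List Char) (h : cs ≠ []) :
    PySem.List.max? (pvAVals (pvADict cs)) (fun x => x) = pvBMaxfreq? cs := by
  obtain ⟨c, t, hct⟩ : ∃ c t, PySem.List.sorted cs (fun c => c) false = c :: t := by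
    cases hs : PySem.List.sorted cs (fun c => c) false with
    | nil => exact absurd ((PySem.List.sorted_eq_nil_iff cs _ false).mp hs) h
    | cons c t => exact ⟨c, t, rfl⟩
  have hperm : (c :: t).Perm cs := hct ▸ PySem.List.sorted_perm cs (fun c => c) false
  have hpw : (c :: t).Pairwise (· ≤ ·) := by
    have := PySem.List.sorted_pairwise cs (fun c : Char => c)
    rwa [hct] at this
  -- B's side reduces to pvRunsOf c 1 t
  have hB : pvBMaxfreq? cs = PySem.List.max? (pvRunsOf c 1 t) (fun x => x) := by
    unfold pvBMaxfreq?
    rw [hct]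
    have h0 : (c :: t).foldl pvStep ([], 0, none) = t.foldl pvStep ([], 1, some c) := by
      simp [pvStep]
    rw [h0, pvFold_runs t [] 1 c (by omega), List.nil_append]
  rw [hB, pvAVals_eq]
  apply pvMax?_id_perm
  -- A's value list ~ counts over dedup of the sorted list ~ B's run lengths
  have hsetperm : (PySem.Set.ofList cs).Perm ((c :: t).dedup) := by
    rw [List.perm_ext_iff_of_nodup (PySem.Set.nodup_ofList cs) (List.nodup_dedup _)]
    intro a
    rw [PySem.Set.mem_ofList, List.mem_dedup, hperm.mem_iff]
  have hcnt : ∀ k, cs.count k = (c :: t).count k := fun k => (hperm.count_eq k).symm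
  have h1 : ((PySem.Set.ofList cs).map (fun k => ((cs.count k : Nat) : Int))).Perm
      (((c :: t).dedup).map (fun k => (if k = c then (1 : Int) - 1 else 0) + (((c :: t).count k : Nat) : Int))) := by
    refine (hsetperm.map _).trans (List.Perm.of_eq (List.map_congr_left ?_))
    intro k hk
    rw [hcnt k]
    by_cases hkc : k = c <;> simp [hkc]
  exact h1.trans (pvRunsOf_perm t c 1 (by omega) hpw).symm

-- ===== VERDICT (by name: the statement is the Claim_ definition above) =====
theorem similarString_spec : Claim_equal_similarString := by
  intro s1 s2 K _ hpre
  obtain ⟨h1, h2⟩ := hpre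
  have hne1 : s1.toList ≠ [] := by
    intro h; apply h1; simp [PySem.Str.len, h]
  have hne2 : s2.toList ≠ [] := by
    intro h; apply h2; simp [PySem.Str.len, h]
  unfold Spec_similarString similarString similarString_alt
  rw [pvMaxfreq_agree s1.toList hne1, pvMaxfreq_agree s2.toList hne2]
  cases pvBMaxfreq? s1.toList <;> cases pvBMaxfreq? s2.toList <;> rfl
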